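-- pv_equiv track=rewrite | github.com/jramaswami/Binary_Search_Python | balls.py | solve
-- ===== SOURCE A (Python) =====
-- def solve(nums):
--     N = len(nums)
--     move_left = [0 for _ in nums]
--     move_right = [0 for _ in nums]
--     if nums:
--         carrying = nums[0]
--         for i in range(1, N):
--             move_left[i] = move_left[i-1] + carrying
--             carrying += nums[i]
--
--         carrying = nums[-1]
--         for i in range(N-2, -1, -1):
--             move_right[i] = move_right[i+1] + carrying
--             carrying += nums[i]
--
--     soln = [l + r for l, r in zip(move_left, move_right)]
--     return soln
-- ===== SOURCE B (Python) =====
-- def solve(nums):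
--     n = len(nums)
--     pre = [0]   # pre[i]  = nums[0] + ... + nums[i-1]
--     wpre = [0]  # wpre[i] = sum(j * nums[j] for j < i)
--     for i, v in enumerate(nums):
--         pre.append(pre[-1] + v)
--         wpre.append(wpre[-1] + i * v)
--     total, wtotal = pre[n], wpre[n]
--     return [(i * pre[i] - wpre[i]) + ((wtotal - wpre[i + 1]) - i * (total - pre[i + 1]))
--             for i in range(n)]
-- ===== Notes on version B (the rewrite author's own statement) =====
-- stated objective: alternative
-- what changed: Replaces A's two stateful carry-loops writing into preallocated arrays (plus a zip pass) with prefix-sum and weighted-prefix-sum tables from which each position's cost is computed by a multiplicative closed form i*pre[i]-wpre[i] + (wtotal-wpre[i+1]) - i*(total-pre[i+1]).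
import Mathlib
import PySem

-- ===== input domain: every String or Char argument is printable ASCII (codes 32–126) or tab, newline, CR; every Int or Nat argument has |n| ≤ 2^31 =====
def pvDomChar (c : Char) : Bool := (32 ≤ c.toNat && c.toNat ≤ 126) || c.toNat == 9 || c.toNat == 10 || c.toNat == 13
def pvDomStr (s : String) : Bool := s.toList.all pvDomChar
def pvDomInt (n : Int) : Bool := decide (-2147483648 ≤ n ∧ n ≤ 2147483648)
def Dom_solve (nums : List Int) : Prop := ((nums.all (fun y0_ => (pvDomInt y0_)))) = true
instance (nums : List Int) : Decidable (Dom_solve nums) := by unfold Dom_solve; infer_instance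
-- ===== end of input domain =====

-- B replaces A's two stateful carry-loops with prefix/weighted-prefix sum tables and a
-- per-index multiplicative closed form (objective: alternative decomposition, same O(n) cost).

-- ===== PORT A =====
-- Literal port of A: two in-place array-update loops with a running carry, then a zip pass.
-- All list indices written/read inside the loops are nonnegative and in range, so `.toNat`
-- with `getD`/`set` is exact here; nums[-1] and nums[0] use PySem.List.pyGetD (exact).
def solve (nums : List Int) : List Int :=
  let N : Int := nums.length
  let move_left : List Int := nums.map (fun _ => (0 : Int))
  let move_right : List Int := nums.map (fun _ => (0 : Int))
  let st :=
    if nums.isEmpty then (move_left, move_right)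
    else
      let s1 := (PySem.List.pyRange 1 N 1).foldl
        (fun (st : List Int × Int) i =>
          (st.1.set i.toNat (st.1.getD (i - 1).toNat 0 + st.2),
           st.2 + PySem.List.pyGetD nums i 0))
        (move_left, PySem.List.pyGetD nums 0 0)
      let s2 := (PySem.List.pyRange (N - 2) (-1) (-1)).foldl
        (fun (st : List Int × Int) i =>
          (st.1.set i.toNat (st.1.getD (i + 1).toNat 0 + st.2),
           st.2 + PySem.List.pyGetD nums i 0))
        (move_right, PySem.List.pyGetD nums (-1) 0)
      (s1.1, s2.1)
  (st.1.zip st.2).map (fun p => p.1 + p.2)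

-- ===== PORT B =====
-- Literal port of B: one enumerate pass appending to the prefix-sum tables pre/wpre,
-- then a comprehension over range(n) computing each entry by the closed form.
def solve_alt (nums : List Int) : List Int :=
  let n := nums.length
  let pw := (PySem.List.enumerate nums).foldl
    (fun (acc : List Int × List Int) iv =>
      (acc.1 ++ [acc.1.getLastD 0 + iv.2],
       acc.2 ++ [acc.2.getLastD 0 + iv.1 * iv.2]))
    ([0], [0])
  let pre := pw.1
  let wpre := pw.2
  let total := pre.getD n 0
  let wtotal := wpre.getD n 0
  (List.range n).map (fun (i : Nat) =>
    ((i : Int) * pre.getD i 0 - wpre.getD i 0)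
      + ((wtotal - wpre.getD (i + 1) 0) - (i : Int) * (total - pre.getD (i + 1) 0)))

-- ===== PRECONDITION & SPEC =====
def Spec_solve (nums : List Int) (out : List Int) : Prop := out = solve_alt nums
instance (nums : List Int) (out : List Int) : Decidable (Spec_solve nums out) := by unfold Spec_solve; infer_instance

-- ===== CLAIM (what is proved, stated in full; the proofs are below) =====
def Claim_equal_solve : Prop := ∀ (nums : List Int), Dom_solve nums → Spec_solve nums (solve nums)

-- ===== LEMMAS AND PROOFS =====

-- prefix sum and weighted prefix sum (proof-side characterizations)
def pvPre (nums : List Int) : Nat → Int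
  | 0 => 0
  | i + 1 => pvPre nums i + nums.getD i 0

def pvW (nums : List Int) : Nat → Int
  | 0 => 0
  | i + 1 => pvW nums i + (i : Int) * nums.getD i 0

def pvL (nums : List Int) (i : Nat) : Int := (i : Int) * pvPre nums i - pvW nums i

def pvR (nums : List Int) (i : Nat) : Int :=
  (pvW nums nums.length - pvW nums (i + 1))
    - (i : Int) * (pvPre nums nums.length - pvPre nums (i + 1))

def pvOut (nums : List Int) : List Int :=
  (List.range nums.length).map (fun i => pvL nums i + pvR nums i)

theorem pvPre_append (xs : List Int) (x : Int) : ∀ i, i ≤ xs.length →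
    pvPre (xs ++ [x]) i = pvPre xs i := by
  intro i
  induction i with
  | zero => intro _; rfl
  | succ j ih =>
    intro h
    simp only [pvPre, ih (by omega)]
    rw [List.getD_append _ _ _ _ (by omega)]

theorem pvW_append (xs : List Int) (x : Int) : ∀ i, i ≤ xs.length →
    pvW (xs ++ [x]) i = pvW xs i := by
  intro i
  induction i with
  | zero => intro _; rfl
  | succ j ih =>
    intro h
    simp only [pvW, ih (by omega)]
    rw [List.getD_append _ _ _ _ (by omega)]

theorem pvGetD_append_self (xs : List Int) (x : Int) :
    (xs ++ [x]).getD xs.length 0 = x := by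
  simp [List.getD]

theorem pvScanB (nums : List Int) :
    (PySem.List.enumerate nums).foldl
      (fun (acc : List Int × List Int) iv =>
        (acc.1 ++ [acc.1.getLastD 0 + iv.2],
         acc.2 ++ [acc.2.getLastD 0 + iv.1 * iv.2]))
      ([0], [0])
    = ((List.range (nums.length + 1)).map (pvPre nums),
       (List.range (nums.length + 1)).map (pvW nums)) := by
  induction nums using List.reverseRecOn with
  | nil => rfl
  | append_singleton xs x ih =>
    have hlast : ∀ (g : Nat → Int),
        ((List.range (xs.length + 1)).map g).getLastD 0 = g xs.length := by
      intro g
      rw [List.range_succ, List.map_append, List.map_cons, List.map_nil, List.getLastD_concat]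
    have hm : ∀ (g g' : Nat → Int), (∀ i ≤ xs.length, g i = g' i) →
        (List.range (xs.length + 1)).map g = (List.range (xs.length + 1)).map g' := by
      intro g g' h
      refine List.map_congr_left ?_
      intro i hi
      exact h i (Nat.lt_succ_iff.mp (List.mem_range.mp hi))
    rw [PySem.List.enumerate_append, List.foldl_append, ih]
    simp only [PySem.List.enumerate_cons, PySem.List.enumerate_nil, List.foldl_cons,
      List.foldl_nil, zero_add, hlast, List.length_append, List.length_singleton,
      Prod.mk.injEq]
    constructor
    · rw [List.range_succ (n := xs.length + 1), List.map_append,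
        hm (pvPre (xs ++ [x])) (pvPre xs) (pvPre_append xs x),
        List.map_cons, List.map_nil]
      congr 1
      simp only [pvPre, pvPre_append xs x xs.length le_rfl, pvGetD_append_self]
    · rw [List.range_succ (n := xs.length + 1), List.map_append,
        hm (pvW (xs ++ [x])) (pvW xs) (pvW_append xs x),
        List.map_cons, List.map_nil]
      congr 1
      simp only [pvW, pvW_append xs x xs.length le_rfl, pvGetD_append_self]

theorem pvB_eq (nums : List Int) : solve_alt nums = pvOut nums := by
  unfold solve_alt
  rw [pvScanB]
  refine List.map_congr_left ?_
  intro i hi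
  have hi' : i < nums.length := List.mem_range.mp hi
  rw [PySem.List.getD_map_range _ _ _ _ (by omega), PySem.List.getD_map_range _ _ _ _ (by omega),
      PySem.List.getD_map_range _ _ _ _ (by omega), PySem.List.getD_map_range _ _ _ _ (by omega),
      PySem.List.getD_map_range _ _ _ _ (by omega), PySem.List.getD_map_range _ _ _ _ (by omega)]
  simp only [pvL, pvR]

-- writing into position k of a picture of the array as a map over List.range
theorem pvSet_map_range (n k : Nat) (f g : Nat → Int) (v : Int) (_hk : k < n)
    (h : ∀ j, j < n → j ≠ k → g j = f j) (hv : g k = v) :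
    ((List.range n).map f).set k v = (List.range n).map g := by
  apply List.ext_getElem
  · simp
  · intro j hj hj'
    simp only [List.getElem_set, List.getElem_map, List.getElem_range]
    simp only [List.length_set, List.length_map, List.length_range] at hj
    by_cases hjk : k = j
    · subst hjk; simp [hv]
    · simp [hjk, h j hj (fun hh => hjk hh.symm)]

theorem pvL_succ (nums : List Int) (k : Nat) :
    pvL nums (k + 1) = pvL nums k + pvPre nums (k + 1) := by
  simp only [pvL, pvPre, pvW]
  push_cast
  ring

theorem pvR_succ (nums : List Int) (t : Nat) :
    pvR nums (t + 1) + (pvPre nums nums.length - pvPre nums (t + 1)) = pvR nums t := by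
  simp only [pvR, pvPre, pvW]
  push_cast
  ring

theorem pvZeros (nums : List Int) :
    nums.map (fun _ => (0 : Int)) = (List.range nums.length).map (fun _ => (0 : Int)) := by
  apply List.ext_getElem <;> simp

-- invariant of A's left-to-right loop: after indices 1..k, entry j holds pvL j for j ≤ k
theorem pvLeftLoop (nums : List Int) : ∀ k, k < nums.length →
    (PySem.List.pyRange 1 (1 + (k : Int)) 1).foldl
      (fun (st : List Int × Int) i =>
        (st.1.set i.toNat (st.1.getD (i - 1).toNat 0 + st.2),
         st.2 + PySem.List.pyGetD nums i 0))
      (nums.map (fun _ => (0 : Int)), PySem.List.pyGetD nums 0 0)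
    = ((List.range nums.length).map (fun j => if j ≤ k then pvL nums j else 0),
       pvPre nums (k + 1)) := by
  intro k
  induction k with
  | zero =>
    intro _
    rw [PySem.List.pyRange_one_eq_nil (by omega)]
    simp only [List.foldl_nil, Prod.mk.injEq]
    constructor
    · rw [pvZeros]
      refine List.map_congr_left ?_
      intro j _
      dsimp only
      by_cases hj0 : j ≤ 0
      · have : j = 0 := by omega
        subst this; simp [pvL, pvPre, pvW]
      · rw [if_neg hj0]
    · rw [PySem.List.pyGetD_zero]
      simp [pvPre]
  | succ k ih =>
    intro hk
    have hk' : k < nums.length := by omega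
    have hcast : (1 + ((k : Nat) + 1 : Nat) : Int) = (1 + (k : Int)) + 1 := by push_cast; ring
    rw [hcast, PySem.List.pyRange_one_succ_right (by omega), List.foldl_append, ih hk']
    simp only [List.foldl_cons, List.foldl_nil]
    have ht1 : ((1 : Int) + (k : Int)).toNat = k + 1 := by omega
    have ht2 : ((1 : Int) + (k : Int) - 1).toNat = k := by omega
    rw [ht1, ht2, PySem.List.getD_map_range _ _ _ _ hk']
    simp only [Prod.mk.injEq]
    constructor
    · rw [if_pos (le_refl k)]
      exact pvSet_map_range nums.length (k + 1)
        (fun j => if j ≤ k then pvL nums j else 0)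
        (fun j => if j ≤ k + 1 then pvL nums j else 0)
        (pvL nums k + pvPre nums (k + 1)) hk
        (by intro j hj hjk
            dsimp only
            by_cases h1 : j ≤ k
            · rw [if_pos h1, if_pos (by omega)]
            · rw [if_neg h1, if_neg (by omega)])
        (by dsimp only
            rw [if_pos (by omega), pvL_succ])
    · rw [PySem.List.pyGetD_of_nonneg _ _ (by omega), ht1]
      simp [pvPre]

-- invariant of A's right-to-left loop, running down from index t-1 to 0
theorem pvRightLoop (nums : List Int) : ∀ t, t ≤ nums.length - 1 →
    (PySem.List.pyRange ((t : Int) - 1) (-1) (-1)).foldl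
      (fun (st : List Int × Int) i =>
        (st.1.set i.toNat (st.1.getD (i + 1).toNat 0 + st.2),
         st.2 + PySem.List.pyGetD nums i 0))
      ((List.range nums.length).map (fun j => if t ≤ j then pvR nums j else 0),
       pvPre nums nums.length - pvPre nums t)
    = ((List.range nums.length).map (fun j => if 0 ≤ j then pvR nums j else 0),
       pvPre nums nums.length - pvPre nums 0) := by
  intro t
  induction t with
  | zero =>
    intro _
    rw [PySem.List.pyRange_neg_one_eq_nil (by omega)]
    simp only [List.foldl_nil]
  | succ t ih =>
    intro ht
    have ht' : t + 1 < nums.length := by omega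
    have hcast : (((t : Nat) + 1 : Nat) : Int) - 1 = (t : Int) := by push_cast; ring
    rw [hcast, PySem.List.pyRange_neg_one_cons (by omega)]
    simp only [List.foldl_cons]
    have ht1 : ((t : Int)).toNat = t := by omega
    have ht2 : ((t : Int) + 1).toNat = t + 1 := by omega
    rw [ht1, ht2, PySem.List.getD_map_range _ _ _ _ ht']
    rw [if_pos (le_refl (t + 1))]
    rw [pvSet_map_range nums.length t
          (fun j => if t + 1 ≤ j then pvR nums j else 0)
          (fun j => if t ≤ j then pvR nums j else 0)
          (pvR nums (t + 1) + (pvPre nums nums.length - pvPre nums (t + 1)))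
          (by omega)
          (by intro j hj hjt
              dsimp only
              by_cases h1 : t + 1 ≤ j
              · rw [if_pos h1, if_pos (by omega)]
              · rw [if_neg h1, if_neg (by omega)])
          (by dsimp only
              rw [if_pos (le_refl t), ← pvR_succ])]
    rw [PySem.List.pyGetD_of_nonneg _ _ (by omega), ht1]
    have hcarry : pvPre nums nums.length - pvPre nums (t + 1) + nums.getD t 0
        = pvPre nums nums.length - pvPre nums t := by
      simp only [pvPre]; ring
    rw [hcarry]
    exact ih (by omega)

theorem pvA_eq (nums : List Int) : solve nums = pvOut nums := by
  rcases eq_or_ne nums [] with h | h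
  · subst h; rfl
  · have hn : 1 ≤ nums.length := List.length_pos_iff.mpr h
    have hne : nums.isEmpty = false := List.isEmpty_eq_false_iff.mpr h
    unfold solve
    simp only [hne, Bool.false_eq_true, if_false]
    have e1 : (nums.length : Int) = 1 + ((nums.length - 1 : Nat) : Int) := by omega
    rw [e1, pvLeftLoop nums (nums.length - 1) (by omega)]
    have e2 : (1 : Int) + ((nums.length - 1 : Nat) : Int) - 2
        = ((nums.length - 1 : Nat) : Int) - 1 := by ring
    rw [e2]
    have hz : nums.map (fun _ => (0 : Int))
        = (List.range nums.length).map
            (fun j => if nums.length - 1 ≤ j then pvR nums j else 0) := by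
      rw [pvZeros]
      refine List.map_congr_left ?_
      intro j hj
      have hj' : j < nums.length := List.mem_range.mp hj
      by_cases h1 : nums.length - 1 ≤ j
      · rw [if_pos h1]
        have hj2 : j + 1 = nums.length := by omega
        simp only [pvR, hj2]
        ring
      · rw [if_neg h1]
    have hc : PySem.List.pyGetD nums (-1) 0
        = pvPre nums nums.length - pvPre nums (nums.length - 1) := by
      rw [PySem.List.pyGetD_neg_one _ _ h]
      obtain ⟨m, hm⟩ : ∃ m, nums.length = m + 1 := ⟨nums.length - 1, by omega⟩
      rw [List.getLast_eq_getElem]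
      simp only [hm, Nat.add_sub_cancel, pvPre]
      rw [List.getD_eq_getElem _ _ (by omega)]
      ring
    rw [hz, hc, pvRightLoop nums (nums.length - 1) (by omega)]
    rw [List.zip_map', List.map_map]
    unfold pvOut
    refine List.map_congr_left ?_
    intro j hj
    have hj' : j < nums.length := List.mem_range.mp hj
    simp only [Function.comp]
    rw [if_pos (by omega : j ≤ nums.length - 1), if_pos (by omega : 0 ≤ j)]

-- ===== VERDICT (by name: the statement is the Claim_ definition above) =====
theorem solve_spec : Claim_equal_solve := by
  intro nums _
  unfold Spec_solve
  rw [pvA_eq, pvB_eq]
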